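-- pv_equiv track=rewrite | github.com/ChanHoLee275/programmers-coding-test-practice | level2/다음-큰-숫자.py | checkNumberOfOne
-- ===== SOURCE A (Python) =====
-- def checkNumberOfOne(number1, number2):
--     number1 = str(bin(number1))
--     number2 = str(bin(number2))
--     count1 = 0
--     count2 = 0
--     for i in list(number1):
--         if i == "1":
--             count1 += 1
--     for i in list(number2):
--         if i == "1":
--             count2 += 1
--     if count1 == count2:
--         return True
--     else :
--         return False
-- ===== SOURCE B (Python) =====
-- def checkNumberOfOne(number1, number2):
--     def popcount(n):
--         m = abs(n)
--         c = 0
--         while m: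
--             m &= m - 1
--             c += 1
--         return c
--     return popcount(number1) == popcount(number2)
-- ===== Notes on version B (the rewrite author's own statement) =====
-- stated objective: idiomatic
-- what changed: Replaces the bin()-string scans with a Brian-Kernighan popcount loop (m &= m-1) on abs(n) and compares the two counts directly.
import Mathlib
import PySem

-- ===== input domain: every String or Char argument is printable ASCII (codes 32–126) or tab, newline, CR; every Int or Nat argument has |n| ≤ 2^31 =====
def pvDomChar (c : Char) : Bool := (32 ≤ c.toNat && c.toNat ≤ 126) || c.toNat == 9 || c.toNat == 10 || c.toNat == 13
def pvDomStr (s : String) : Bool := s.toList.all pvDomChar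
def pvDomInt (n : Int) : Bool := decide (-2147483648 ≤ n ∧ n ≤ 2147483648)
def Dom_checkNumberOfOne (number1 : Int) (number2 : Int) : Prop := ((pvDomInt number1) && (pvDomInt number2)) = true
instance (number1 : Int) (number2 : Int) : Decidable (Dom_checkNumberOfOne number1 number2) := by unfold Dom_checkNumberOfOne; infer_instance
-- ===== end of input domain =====

-- B replaces A's bin()-string scans with a Brian-Kernighan popcount loop on abs(n); return value only, no side effects.

-- ===== PORT A =====
-- binary digits of a positive number, most significant first (what Python's bin emits after the prefix)
def pyBinDigits : Nat → List Char
  | 0 => []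
  | n + 1 => pyBinDigits ((n + 1) / 2) ++ [if (n + 1) % 2 = 1 then '1' else '0']
decreasing_by exact Nat.div_lt_self (Nat.succ_pos n) (by omega)

-- Python's bin(n) as a list of characters: optional '-', then "0b", then the digits of |n| ("0" for 0)
def pyBin (n : Int) : List Char :=
  (if n < 0 then ['-'] else []) ++ '0' :: 'b' :: (if n.natAbs = 0 then ['0'] else pyBinDigits n.natAbs)

-- A's for-loop: scan the characters, add 1 for each '1'
def countOnesLoop (cs : List Char) (count : Nat) : Nat :=
  cs.foldl (fun c i => if i = '1' then c + 1 else c) count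

def checkNumberOfOne (number1 : Int) (number2 : Int) : Bool :=
  let s1 := pyBin number1
  let s2 := pyBin number2
  let count1 := countOnesLoop s1 0
  let count2 := countOnesLoop s2 0
  if count1 = count2 then true else false

-- ===== PORT B =====
-- Brian-Kernighan: while m ≠ 0: m &= m-1; c += 1
def popcountK : Nat → Nat
  | 0 => 0
  | m + 1 => popcountK ((m + 1) &&& m) + 1
decreasing_by exact Nat.lt_succ_of_le (Nat.and_le_right)

def checkNumberOfOne_alt (number1 : Int) (number2 : Int) : Bool :=
  popcountK number1.natAbs == popcountK number2.natAbs

-- ===== PRECONDITION & SPEC =====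
def Spec_checkNumberOfOne (number1 : Int) (number2 : Int) (out : Bool) : Prop := out = checkNumberOfOne_alt number1 number2
instance (number1 : Int) (number2 : Int) (out : Bool) : Decidable (Spec_checkNumberOfOne number1 number2 out) := by unfold Spec_checkNumberOfOne; infer_instance

-- ===== CLAIM (what is proved, stated in full; the proofs are below) =====
def Claim_equal_checkNumberOfOne : Prop := ∀ (number1 : Int) (number2 : Int), Dom_checkNumberOfOne number1 number2 → Spec_checkNumberOfOne number1 number2 (checkNumberOfOne number1 number2)

-- ===== LEMMAS AND PROOFS =====

theorem popcountK_eq (m : Nat) (h : m ≠ 0) : popcountK m = popcountK (m &&& (m - 1)) + 1 := by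
  cases m with
  | zero => exact absurd rfl h
  | succ k => simp [popcountK]

-- clearing the lowest bit of an odd number subtracts 1
theorem land_pred_of_odd (m : Nat) (h : m % 2 = 1) : m &&& (m - 1) = m - 1 := by
  apply Nat.eq_of_testBit_eq
  intro i
  rw [Nat.testBit_land]
  cases i with
  | zero =>
    rw [Nat.testBit_zero, Nat.testBit_zero]
    have : (m - 1) % 2 = 0 := by omega
    simp [this]
  | succ j =>
    rw [Nat.testBit_succ, Nat.testBit_succ]
    have : (m - 1) / 2 = m / 2 := by omega
    rw [this, Bool.and_self]

-- clearing the lowest bit commutes with doubling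
theorem land_pred_double (a : Nat) :
    (2 * a) &&& (2 * a - 1) = 2 * (a &&& (a - 1)) := by
  apply Nat.eq_of_testBit_eq
  intro i
  rw [Nat.testBit_land]
  cases i with
  | zero =>
    rw [Nat.testBit_zero, Nat.testBit_zero, Nat.testBit_zero]
    have h1 : (2 * a) % 2 = 0 := by omega
    have h2 : (2 * (a &&& (a - 1))) % 2 = 0 := by omega
    simp [h1, h2]
  | succ j =>
    simp only [Nat.testBit_succ]
    have h1 : (2 * a) / 2 = a := by omega
    have h2 : (2 * a - 1) / 2 = a - 1 := by omega
    have h3 : (2 * (a &&& (a - 1))) / 2 = a &&& (a - 1) := by omega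
    rw [h1, h2, h3, Nat.testBit_land]

theorem popcountK_double (a : Nat) : popcountK (2 * a) = popcountK a := by
  induction a using Nat.strong_induction_on with
  | _ a ih =>
    rcases Nat.eq_zero_or_pos a with rfl | ha
    · rfl
    · have hne : a ≠ 0 := by omega
      have h2a : (2 * a) ≠ 0 := by omega
      rw [popcountK_eq (2 * a) h2a, land_pred_double a,
        ih (a &&& (a - 1)) (by calc a &&& (a - 1) ≤ a - 1 := Nat.and_le_right
                                 _ < a := by omega),
        popcountK_eq a hne]

theorem popcountK_div2 (m : Nat) (h : m ≠ 0) : popcountK m = popcountK (m / 2) + m % 2 := by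
  rcases Nat.even_or_odd m with he | ho
  · have h0 : m % 2 = 0 := Nat.even_iff.mp he
    have hm : m = 2 * (m / 2) := by omega
    have : popcountK m = popcountK (m / 2) := by
      conv_lhs => rw [hm]
      exact popcountK_double (m / 2)
    omega
  · have hodd : m % 2 = 1 := Nat.odd_iff.mp ho
    have hpred : m - 1 = 2 * (m / 2) := by omega
    rw [popcountK_eq m h, land_pred_of_odd m hodd, hpred, popcountK_double, hodd]

-- counting the '1' characters of the digit string is popcountK
theorem count_pyBinDigits (m : Nat) : (pyBinDigits m).count '1' = popcountK m := by
  induction m using Nat.strong_induction_on with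
  | _ m ih =>
    cases m with
    | zero => simp [pyBinDigits, popcountK]
    | succ k =>
      rw [pyBinDigits, List.count_append,
        ih ((k + 1) / 2) (Nat.div_lt_self (Nat.succ_pos k) (by omega)),
        popcountK_div2 (k + 1) (Nat.succ_ne_zero k)]
      rcases Nat.even_or_odd (k + 1) with he | ho
      · have h0 : (k + 1) % 2 = 0 := Nat.even_iff.mp he
        simp [h0]
      · have h1 : (k + 1) % 2 = 1 := Nat.odd_iff.mp ho
        simp [h1]

theorem countOnesLoop_count (cs : List Char) (c : Nat) :
    countOnesLoop cs c = c + cs.count '1' := by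
  induction cs generalizing c with
  | nil => simp [countOnesLoop]
  | cons x xs ih =>
    simp only [countOnesLoop, List.foldl_cons] at *
    by_cases hx : x = '1' <;> simp [hx, ih] <;> omega

theorem countOnes_pyBin (n : Int) : countOnesLoop (pyBin n) 0 = popcountK n.natAbs := by
  rw [countOnesLoop_count, pyBin]
  rcases Nat.eq_zero_or_pos n.natAbs with h0 | hpos
  · by_cases hn : n < 0 <;> simp [h0, hn, popcountK]
  · have hne : n.natAbs ≠ 0 := by omega
    by_cases hn : n < 0 <;>
      simp [hne, hn, count_pyBinDigits]

-- ===== VERDICT (by name: the statement is the Claim_ definition above) =====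
theorem checkNumberOfOne_spec : Claim_equal_checkNumberOfOne := by
  intro n1 n2 _
  unfold Spec_checkNumberOfOne checkNumberOfOne checkNumberOfOne_alt
  simp only [countOnes_pyBin]
  by_cases h : popcountK n1.natAbs = popcountK n2.natAbs <;> simp [h]
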